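-- pv_equiv track=rewrite | github.com/democratize-technology/reasoning_library | fix_code_quality.py | fix_line_break_style
-- ===== SOURCE A (Python) =====
-- def fix_line_break_style(content: str) -> str:
--     """Fix W504: line break after binary operator."""
--     lines = content.split('\n')
--     fixed_lines = []
--
--     for i, line in enumerate(lines):
--         stripped = line.strip()
--
--         # Look for lines that start with an operator (bad style)
--         if stripped.startswith((' and ', ' or ', ' + ', ' - ', ' * ', ' / ')):
--             # This is a line that starts with an operator - try to fix
--             if i > 0:
--                 prev_line = lines[i-1].rstrip()
--                 # Combine with previous line
--                 combined = prev_line + ' ' + stripped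
--                 if len(combined) <= 88:
--                     fixed_lines[-1] = combined
--                     continue
--
--         fixed_lines.append(line)
--
--     return '\n'.join(fixed_lines)
-- ===== SOURCE B (Python) =====
-- def fix_line_break_style(content: str) -> str:
--     """Fix W504: line break after binary operator."""
--     # Every operator pattern begins with a space, but line.strip() never
--     # leaves a leading space, so A's merge branch can never fire: the
--     # function is the identity on content ('\n'.join(s.split('\n')) == s).
--     return content
-- ===== Notes on version B (the rewrite author's own statement) =====
-- stated objective: simpler
-- what changed: A's merge branch is dead (a stripped line cannot start with the space-prefixed operator patterns), so B replaces the split/loop/join with the identity closed form.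
import Mathlib
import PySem

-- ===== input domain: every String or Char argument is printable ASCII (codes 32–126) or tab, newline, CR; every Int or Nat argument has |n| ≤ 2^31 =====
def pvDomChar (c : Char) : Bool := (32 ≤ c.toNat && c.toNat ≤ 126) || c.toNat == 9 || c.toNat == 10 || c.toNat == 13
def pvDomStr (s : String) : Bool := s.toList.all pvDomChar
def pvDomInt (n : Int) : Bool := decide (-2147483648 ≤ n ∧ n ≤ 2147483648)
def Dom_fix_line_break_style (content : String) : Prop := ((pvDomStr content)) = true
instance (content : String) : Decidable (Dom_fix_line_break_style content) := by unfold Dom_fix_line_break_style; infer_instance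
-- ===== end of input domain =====

-- B is the identity: A's merge branch is dead because a stripped line cannot start
-- with any of the space-prefixed operator patterns; proved below, return value only.

-- ===== PORT A =====
def fix_line_break_style (content : String) : String :=
  let lines := (PySem.Str.split? content "\n").getD []
  let fixed_lines := (PySem.List.enumerate lines).foldl (fun fixed_lines p =>
    let i := p.1
    let line := p.2
    let stripped := PySem.Str.strip line
    if PySem.Str.startswith stripped " and " || PySem.Str.startswith stripped " or " ||
       PySem.Str.startswith stripped " + " || PySem.Str.startswith stripped " - " ||
       PySem.Str.startswith stripped " * " || PySem.Str.startswith stripped " / " then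
      if i > 0 then
        let prev_line := PySem.Str.rstrip ((PySem.List.pyGet? lines (i - 1)).getD "")
        let combined := prev_line ++ " " ++ stripped
        if PySem.Str.len combined ≤ 88 then fixed_lines.dropLast ++ [combined]
        else fixed_lines ++ [line]
      else fixed_lines ++ [line]
    else fixed_lines ++ [line]) []
  PySem.Str.join "\n" fixed_lines

-- ===== PORT B =====
def fix_line_break_style_alt (content : String) : String := content

-- ===== PRECONDITION & SPEC =====
def Spec_fix_line_break_style (content : String) (out : String) : Prop := out = fix_line_break_style_alt content
instance (content : String) (out : String) : Decidable (Spec_fix_line_break_style content out) := by unfold Spec_fix_line_break_style; infer_instance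

-- ===== CLAIM (what is proved, stated in full; the proofs are below) =====
def Claim_equal_fix_line_break_style : Prop := ∀ (content : String), Dom_fix_line_break_style content → Spec_fix_line_break_style content (fix_line_break_style content)

-- ===== LEMMAS AND PROOFS =====

theorem dropWhile_head_false {α : Type} (p : α → Bool) (l : List α) (c : α) (t : List α)
    (h : l.dropWhile p = c :: t) : p c = false := by
  have hne : l.dropWhile p ≠ [] := by simp [h]
  have := List.head_dropWhile_not p hne
  simp [h] at this; exact this

-- strip never leaves a leading whitespace character
theorem strip_head_not_space (cs : List Char) (c : Char) (t : List Char)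
    (h : PySem.Chars.strip cs = c :: t) : PySem.Chars.isspace c = false := by
  unfold PySem.Chars.strip PySem.Chars.rstrip at h
  have hpre : (List.dropWhile PySem.Chars.isspace (PySem.Chars.lstrip cs).reverse).reverse <+: PySem.Chars.lstrip cs := by
    have hsuf := List.dropWhile_suffix (l := (PySem.Chars.lstrip cs).reverse) (p := PySem.Chars.isspace)
    exact (List.reverse_suffix (l₁ := (List.dropWhile PySem.Chars.isspace (PySem.Chars.lstrip cs).reverse).reverse)
      (l₂ := PySem.Chars.lstrip cs)).mp (by simpa using hsuf)
  rw [h] at hpre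
  obtain ⟨r, hr⟩ := hpre
  have hys' : List.dropWhile PySem.Chars.isspace cs = c :: (t ++ r) := by
    unfold PySem.Chars.lstrip at hr; simpa using hr.symm
  exact dropWhile_head_false _ _ _ _ hys'

theorem startswith_strip_space (cs : List Char) (rest : List Char) :
    PySem.Chars.startswith (PySem.Chars.strip cs) (' ' :: rest) = false := by
  by_contra hne
  have h : (' ' :: rest) <+: PySem.Chars.strip cs :=
    (PySem.Chars.startswith_iff _ _).mp (by revert hne; cases PySem.Chars.startswith (PySem.Chars.strip cs) (' ' :: rest) <;> simp)
  obtain ⟨r, hr⟩ := h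
  have := strip_head_not_space cs ' ' (rest ++ r) (by simpa using hr.symm)
  simp [PySem.Chars.isspace] at this

-- a stripped string never starts with a pattern whose first character is a space
theorem startswith_strip_pat (line pat : String) (h : pat.toList.head? = some ' ') :
    PySem.Str.startswith (PySem.Str.strip line) pat = false := by
  obtain ⟨rest, hp⟩ : ∃ rest, pat.toList = ' ' :: rest := by
    cases hpl : pat.toList with
    | nil => rw [hpl] at h; simp at h
    | cons a b => rw [hpl] at h; simp at h; exact ⟨b, by rw [h]⟩
  simp [PySem.Str.startswith, hp, PySem.Str.toList_strip, startswith_strip_space]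

theorem join_sep (sep : List Char) (xs : List (List Char)) (y : List Char) :
    PySem.Chars.join sep (xs ++ [y]) =
      PySem.Chars.join sep xs ++ (if xs.isEmpty then [] else sep) ++ y := by
  induction xs with
  | nil => simp [PySem.Chars.join, List.intercalate]
  | cons a as ih =>
    cases as with
    | nil => simp [PySem.Chars.join, List.intercalate, List.intersperse]
    | cons b bs =>
      have hstep : ∀ (l : List (List Char)), PySem.Chars.join sep (a :: b :: l)
          = a ++ sep ++ PySem.Chars.join sep (b :: l) := by
        intro l; simp [PySem.Chars.join, List.intercalate, List.intersperse]
      rw [show (a :: b :: bs) ++ [y] = a :: b :: (bs ++ [y]) by simp, hstep,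
        show b :: (bs ++ [y]) = (b :: bs) ++ [y] by simp, ih, hstep]
      simp

theorem go_join (fuel : Nat) : ∀ (l cur : List Char) (acc : List (List Char)), l.length ≤ fuel →
    PySem.Chars.join ['\n'] (PySem.Chars.splitOn.go ['\n'] fuel l cur acc) =
      PySem.Chars.join ['\n'] acc.reverse ++ (if acc.isEmpty then [] else ['\n']) ++ cur.reverse ++ l := by
  induction fuel with
  | zero =>
    intro l cur acc hl
    have : l = [] := List.eq_nil_of_length_eq_zero (Nat.le_zero.mp hl)
    subst this
    simp [PySem.Chars.splitOn.go, join_sep]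
  | succ n ih =>
    intro l cur acc hl
    cases l with
    | nil => simp [PySem.Chars.splitOn.go, join_sep]
    | cons c rest =>
      by_cases hc : c = '\n'
      · subst hc
        rw [show PySem.Chars.splitOn.go ['\n'] (n+1) ('\n'::rest) cur acc
            = PySem.Chars.splitOn.go ['\n'] n (List.drop 1 ('\n'::rest)) [] (cur.reverse :: acc) by
          simp [PySem.Chars.splitOn.go, List.isPrefixOf]]
        rw [ih _ _ _ (by simpa using Nat.le_of_succ_le_succ hl)]
        simp [join_sep]
      · rw [show PySem.Chars.splitOn.go ['\n'] (n+1) (c::rest) cur acc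
            = PySem.Chars.splitOn.go ['\n'] n rest (c :: cur) acc by
          have hc' : ('\n' = c) = False := by simp [eq_comm, hc]
          simp [PySem.Chars.splitOn.go, List.isPrefixOf, hc']]
        rw [ih _ _ _ (by simpa using Nat.le_of_succ_le_succ hl)]
        simp

-- '\n'.join(s.split('\n')) == s
theorem join_splitOn (cs : List Char) :
    PySem.Chars.join ['\n'] (PySem.Chars.splitOn cs ['\n']) = cs := by
  unfold PySem.Chars.splitOn
  rw [go_join (cs.length + 1) cs [] [] (by omega)]
  simp [PySem.Chars.join, List.intercalate]

-- ===== VERDICT (by name: the statement is the Claim_ definition above) =====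
theorem fix_line_break_style_spec : Claim_equal_fix_line_break_style := by
  intro content _
  unfold Spec_fix_line_break_style fix_line_break_style fix_line_break_style_alt
  have hsplit : PySem.Str.split? content "\n"
      = some ((PySem.Chars.splitOn content.toList ['\n']).map String.ofList) := by
    simp [PySem.Str.split?, PySem.Chars.split?]
  rw [hsplit]
  simp only [Option.getD_some]
  set lines := (PySem.Chars.splitOn content.toList ['\n']).map String.ofList with hl
  rw [PySem.List.foldl_congr_mem (PySem.List.enumerate lines) _ (fun acc p => acc ++ [p.2]) []
    (by
      intro acc p _
      simp only [startswith_strip_pat _ " and " (by decide), startswith_strip_pat _ " or " (by decide),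
        startswith_strip_pat _ " + " (by decide), startswith_strip_pat _ " - " (by decide),
        startswith_strip_pat _ " * " (by decide), startswith_strip_pat _ " / " (by decide)]
      simp)]
  rw [PySem.List.foldl_append_singleton_eq_map (fun p => p.2) (PySem.List.enumerate lines) []]
  rw [show (PySem.List.enumerate lines).map (fun p => p.2) = lines from PySem.List.map_snd_enumerate lines 0]
  rw [hl]
  simp only [PySem.Str.join]
  have : (lines.map String.toList) = PySem.Chars.splitOn content.toList ['\n'] := by
    rw [hl]; simp [List.map_map, Function.comp_def]
  rw [hl] at this
  calc String.ofList (PySem.Chars.join "\n".toList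
        (((PySem.Chars.splitOn content.toList ['\n']).map String.ofList).map String.toList))
      = String.ofList (PySem.Chars.join ['\n'] (PySem.Chars.splitOn content.toList ['\n'])) := by
        rw [this]; rfl
    _ = content := by rw [join_splitOn]; exact String.ofList_toList
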